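-- pv_equiv track=rewrite | github.com/HeathenToaster/code | VIGOR_utils.py | reCutBins
-- ===== SOURCE A (Python) =====
-- def reCutBins(data_to_cut, data_template):
--     output = {}
--     start_of_bin = 0
--     for i, bin in enumerate(data_template):
--         end_of_bin = start_of_bin + len(data_template[i])
--         output[i] = data_to_cut[start_of_bin: end_of_bin]
--         start_of_bin = end_of_bin
--     return output
-- ===== SOURCE B (Python) =====
-- def reCutBins(data_to_cut, data_template):
--     lengths = [len(b) for b in data_template]
--     ends = [sum(lengths[:i + 1]) for i in range(len(lengths))]
--     starts = [0] + ends[:-1]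
--     return {i: data_to_cut[s:e] for i, (s, e) in enumerate(zip(starts, ends))}
-- ===== Notes on version B (the rewrite author's own statement) =====
-- stated objective: alternative
-- what changed: B precomputes a table of all cumulative bin boundaries (ends via prefix sums, starts shifted) and then builds the output in a separate slicing pass, instead of threading a running offset through one loop.
import Mathlib
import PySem

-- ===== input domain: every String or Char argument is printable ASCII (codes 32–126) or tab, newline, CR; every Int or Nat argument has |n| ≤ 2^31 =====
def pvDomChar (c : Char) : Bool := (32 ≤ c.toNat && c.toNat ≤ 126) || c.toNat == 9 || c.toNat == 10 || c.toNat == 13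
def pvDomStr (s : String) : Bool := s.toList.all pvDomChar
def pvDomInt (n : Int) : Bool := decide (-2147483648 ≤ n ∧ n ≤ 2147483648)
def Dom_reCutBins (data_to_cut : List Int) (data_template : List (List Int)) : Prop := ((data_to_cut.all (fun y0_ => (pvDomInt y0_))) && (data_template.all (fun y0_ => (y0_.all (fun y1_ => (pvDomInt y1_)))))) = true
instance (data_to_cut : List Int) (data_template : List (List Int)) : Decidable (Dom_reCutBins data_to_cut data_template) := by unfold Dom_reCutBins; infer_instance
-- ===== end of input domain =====

-- B replaces A's running-offset loop by a precomputed table of cumulative bin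
-- boundaries (prefix sums) followed by a separate slicing pass (alternative
-- decomposition, no speed claim).

-- ===== PORT A =====
def reCutBins (data_to_cut : List Int) (data_template : List (List Int)) : List (Int × List Int) :=
  let st := (PySem.List.enumerate data_template 0).foldl
    (fun (st : PySem.Dict Int (List Int) × Int) p =>
      let end_of_bin : Int := st.2 + (((PySem.List.pyGet? data_template p.1).getD []).length : Int)
      (st.1.insert p.1 (PySem.List.slice data_to_cut (some st.2) (some end_of_bin)), end_of_bin))
    (PySem.Dict.empty, 0)
  st.1.items

-- ===== PORT B =====
def reCutBins_alt (data_to_cut : List Int) (data_template : List (List Int)) : List (Int × List Int) :=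
  let lengths : List Int := data_template.map (fun b => (b.length : Int))
  let ends : List Int := (List.range lengths.length).map (fun i => (lengths.take (i+1)).sum)
  let starts : List Int := 0 :: ends.dropLast
  (PySem.List.enumerate (starts.zip ends) 0).map
    (fun p => (p.1, PySem.List.slice data_to_cut (some p.2.1) (some p.2.2)))

-- ===== PRECONDITION & SPEC =====
def Spec_reCutBins (data_to_cut : List Int) (data_template : List (List Int)) (out : List (Int × List Int)) : Prop := out = reCutBins_alt data_to_cut data_template
instance (data_to_cut : List Int) (data_template : List (List Int)) (out : List (Int × List Int)) : Decidable (Spec_reCutBins data_to_cut data_template out) := by unfold Spec_reCutBins; infer_instance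

-- ===== CLAIM (what is proved, stated in full; the proofs are below) =====
def Claim_equal_reCutBins : Prop := ∀ (data_to_cut : List Int) (data_template : List (List Int)), Dom_reCutBins data_to_cut data_template → Spec_reCutBins data_to_cut data_template (reCutBins data_to_cut data_template)

-- ===== LEMMAS AND PROOFS =====

/-- prefix sum of bin lengths: offset of the start of bin `k`. -/
def preLen (t : List (List Int)) (k : Nat) : Int := ((t.take k).map (fun b => (b.length : Int))).sum

/-- the common normal form both ports are reduced to. -/
def binsSpec (d : List Int) (t : List (List Int)) : List (Int × List Int) :=
  (List.range t.length).map
    (fun (k : Nat) => ((k : Int), PySem.List.slice d (some (preLen t k)) (some (preLen t (k+1)))))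

/-- A's loop body after resolving the `data_template[i]` lookup. -/
def stepG (d : List Int) (st : PySem.Dict Int (List Int) × Int) (p : Int × List Int) :
    PySem.Dict Int (List Int) × Int :=
  (st.1.insert p.1 (PySem.List.slice d (some st.2) (some (st.2 + (p.2.length : Int)))),
   st.2 + (p.2.length : Int))

theorem preLen_zero (t : List (List Int)) : preLen t 0 = 0 := by simp [preLen]

theorem preLen_cons (b : List Int) (t : List (List Int)) (k : Nat) :
    preLen (b :: t) (k+1) = (b.length : Int) + preLen t k := by
  simp [preLen]

theorem foldA (d : List Int) :
    ∀ (t : List (List Int)) (s : Int) (dict : PySem.Dict Int (List Int)) (off : Int),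
      (∀ k ∈ dict.keys, k < s) →
      (((PySem.List.enumerate t s).foldl (stepG d) (dict, off)).1.items
        = dict.items ++ (List.range t.length).map
            (fun (j : Nat) => ((s + j : Int),
              PySem.List.slice d (some (off + preLen t j)) (some (off + preLen t (j+1))))))
  | [], s, dict, off, h => by
      simp [PySem.List.enumerate_nil]
  | b :: t, s, dict, off, h => by
      rw [PySem.List.enumerate_cons]
      have hns : dict.contains s = false := by
        rw [PySem.Dict.contains_eq_decide_mem_keys]
        simp only [decide_eq_false_iff_not]
        intro hm; exact absurd (h s hm) (lt_irrefl s)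
      have hkeys : ∀ k ∈ (dict.insert s (PySem.List.slice d (some off)
          (some (off + (b.length : Int))))).keys, k < s + 1 := by
        intro k hk
        rcases (PySem.Dict.mem_keys_insert _ _ _ _).1 hk with rfl | hk'
        · omega
        · have := h k hk'; omega
      have ih := foldA d t (s + 1)
        (dict.insert s (PySem.List.slice d (some off) (some (off + (b.length : Int)))))
        (off + (b.length : Int)) hkeys
      simp only [List.foldl_cons, stepG] at ih ⊢
      rw [ih, PySem.Dict.items_insert, hns]
      simp only [Bool.false_eq_true, if_false]
      rw [List.length_cons, List.range_succ_eq_map]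
      simp only [List.map_cons, List.map_map]
      rw [List.append_assoc]
      congr 1
      simp only [List.singleton_append]
      congr 1
      · simp [preLen_zero, preLen_cons]
      · apply List.map_congr_left
        intro j _
        simp only [Function.comp]
        have h1 : s + ((j : Int) + 1) = s + 1 + j := by ring
        have h2 : preLen (b :: t) (j + 1) = (b.length : Int) + preLen t j := preLen_cons b t j
        have h3 : preLen (b :: t) (j + 1 + 1) = (b.length : Int) + preLen t (j + 1) := preLen_cons b t (j+1)
        simp only [Nat.succ_eq_add_one, h2, h3, Prod.mk.injEq]
        refine ⟨by push_cast; ring, ?_⟩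
        have e1 : off + (b.length : Int) + preLen t j = off + ((b.length : Int) + preLen t j) := by ring
        have e2 : off + (b.length : Int) + preLen t (j+1) = off + ((b.length : Int) + preLen t (j+1)) := by ring
        rw [e1, e2]

theorem reCutBins_eq_spec (d : List Int) (t : List (List Int)) :
    reCutBins d t = binsSpec d t := by
  unfold reCutBins binsSpec
  have hcongr : (PySem.List.enumerate t 0).foldl
      (fun (st : PySem.Dict Int (List Int) × Int) p =>
        (st.1.insert p.1 (PySem.List.slice d (some st.2)
          (some (st.2 + (((PySem.List.pyGet? t p.1).getD []).length : Int)))),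
         st.2 + (((PySem.List.pyGet? t p.1).getD []).length : Int)))
      (PySem.Dict.empty, 0)
    = (PySem.List.enumerate t 0).foldl (stepG d) (PySem.Dict.empty, 0) := by
    apply PySem.List.foldl_congr_mem
    intro acc p hp
    rcases (PySem.List.mem_enumerate_iff _ _ _).1 hp with ⟨k, hk, rfl⟩
    simp [stepG, hk]
  rw [hcongr, foldA d t 0 PySem.Dict.empty 0 (by simp [PySem.Dict.keys_empty])]
  simp [PySem.Dict.empty]

def endsB (t : List (List Int)) : List Int :=
  (List.range (t.map (fun b => (b.length : Int))).length).map
    (fun i => ((t.map (fun b => (b.length : Int))).take (i+1)).sum)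

theorem endsB_length (t : List (List Int)) : (endsB t).length = t.length := by
  simp [endsB]

theorem endsB_getElem (t : List (List Int)) (j : Nat) (hj : j < (endsB t).length) :
    (endsB t)[j] = preLen t (j+1) := by
  simp [endsB, preLen, ← List.map_take]

theorem zip_boundaries (t : List (List Int)) :
    (((0 : Int) :: (endsB t).dropLast).zip (endsB t))
      = (List.range t.length).map (fun k => (preLen t k, preLen t (k+1))) := by
  apply List.ext_getElem
  · simp only [List.length_zip, List.length_cons, List.length_dropLast, endsB_length,
      List.length_map, List.length_range]
    omega
  · intro k h1 h2
    have hk : k < t.length := by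
      simp only [List.length_map, List.length_range] at h2; exact h2
    simp only [List.getElem_zip, List.getElem_map, List.getElem_range, Prod.mk.injEq]
    refine ⟨?_, ?_⟩
    · cases k with
      | zero => simp [preLen_zero]
      | succ j =>
        rw [List.getElem_cons_succ, List.getElem_dropLast, endsB_getElem]
    · rw [endsB_getElem]

theorem enumerate_map_range {α : Type} (f : Nat → α) (n : Nat) :
    PySem.List.enumerate ((List.range n).map f) 0
      = (List.range n).map (fun (k : Nat) => ((k : Int), f k)) := by
  apply List.ext_getElem
  · simp [PySem.List.length_enumerate]
  · intro k h1 h2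
    rw [PySem.List.getElem_enumerate]
    simp

theorem reCutBins_alt_eq_spec (d : List Int) (t : List (List Int)) :
    reCutBins_alt d t = binsSpec d t := by
  show (PySem.List.enumerate ((((0 : Int) :: (endsB t).dropLast)).zip (endsB t)) 0).map
      (fun p => (p.1, PySem.List.slice d (some p.2.1) (some p.2.2))) = binsSpec d t
  rw [zip_boundaries, enumerate_map_range]
  unfold binsSpec
  rw [List.map_map]
  rfl

-- ===== VERDICT (by name: the statement is the Claim_ definition above) =====
theorem reCutBins_spec : Claim_equal_reCutBins := by
  intro d t _
  unfold Spec_reCutBins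
  rw [reCutBins_eq_spec, reCutBins_alt_eq_spec]
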